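-- pv_equiv track=rewrite | github.com/qazifabiahoq/QuickList | app.py | _detect_materials_style
-- ===== SOURCE A (Python) =====
-- from typing import List, Dict
--
-- def _detect_materials_style(labels: List[str], category: str) -> tuple:
--     """Comprehensive material and style detection from labels"""
--     materials = ["Quality", "Fabric"]
--     style = "Classic"
--
--     all_labels = ' '.join(labels).lower()
--
--     # COMPREHENSIVE MATERIAL DETECTION
--     if any(mat in all_labels for mat in ['silk', 'satin', 'charmeuse']):
--         materials = ["Silk", "Luxurious"]
--     elif any(mat in all_labels for mat in ['cotton', 'organic']):
--         materials = ["Cotton", "Breathable"]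
--     elif any(mat in all_labels for mat in ['linen', 'flax']):
--         materials = ["Linen", "Natural"]
--     elif any(mat in all_labels for mat in ['wool', 'cashmere', 'merino']):
--         materials = ["Wool", "Warm"]
--     elif any(mat in all_labels for mat in ['leather', 'suede', 'nubuck']):
--         materials = ["Leather", "Premium"]
--     elif any(mat in all_labels for mat in ['denim', 'chambray']):
--         materials = ["Denim", "Durable"]
--     elif any(mat in all_labels for mat in ['velvet', 'velour', 'plush']):
--         materials = ["Velvet", "Plush"]
--     elif any(mat in all_labels for mat in ['chiffon', 'georgette', 'sheer']):
--         materials = ["Chiffon", "Lightweight"]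
--     elif any(mat in all_labels for mat in ['knit', 'sweater', 'cable']):
--         materials = ["Knit", "Cozy"]
--     elif any(mat in all_labels for mat in ['polyester', 'poly']):
--         materials = ["Polyester", "Wrinkle-resistant"]
--     elif any(mat in all_labels for mat in ['stretch', 'spandex', 'lycra']):
--         materials = ["Stretch", "Comfortable"]
--     elif any(mat in all_labels for mat in ['sequin', 'glitter', 'sparkle']):
--         materials = ["Sequin", "Sparkling"]
--     elif any(mat in all_labels for mat in ['lace', 'crochet', 'eyelet']):
--         materials = ["Lace", "Delicate"]
--     elif any(mat in all_labels for mat in ['mesh', 'net', 'tulle']):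
--         materials = ["Mesh", "Sheer"]
--     elif any(mat in all_labels for mat in ['fleece', 'sherpa', 'teddy']):
--         materials = ["Fleece", "Warm"]
--     elif category == "Apparel & Fashion":
--         materials = ["Fabric", "Quality Material"]
--
--     # COMPREHENSIVE STYLE DETECTION
--     if any(s in all_labels for s in ['elegant', 'formal', 'evening', 'sophisticated', 'luxury', 'cocktail']):
--         style = "Elegant"
--     elif any(s in all_labels for s in ['casual', 'everyday', 'comfortable', 'relaxed']):
--         style = "Casual"
--     elif any(s in all_labels for s in ['vintage', 'retro', 'classic', 'antique', 'throwback']):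
--         style = "Vintage"
--     elif any(s in all_labels for s in ['modern', 'contemporary', 'trendy', 'fashion-forward', 'chic']):
--         style = "Modern"
--     elif any(s in all_labels for s in ['boho', 'bohemian', 'hippie', 'festival', 'free spirit']):
--         style = "Boho"
--     elif any(s in all_labels for s in ['romantic', 'feminine', 'delicate', 'soft', 'dreamy']):
--         style = "Romantic"
--     elif any(s in all_labels for s in ['edgy', 'bold', 'statement', 'punk', 'grunge']):
--         style = "Edgy"
--     elif any(s in all_labels for s in ['preppy', 'classic', 'collegiate', 'ivy league']):
--         style = "Preppy"
--     elif any(s in all_labels for s in ['athletic', 'sporty', 'activewear', 'performance']):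
--         style = "Athletic"
--     elif any(s in all_labels for s in ['minimalist', 'minimal', 'simple', 'clean']):
--         style = "Minimalist"
--     elif any(s in all_labels for s in ['glamorous', 'glam', 'sparkle', 'luxe']):
--         style = "Glamorous"
--
--     return materials, style
-- ===== SOURCE B (Python) =====
-- from typing import List, Dict
--
-- # Flat keyword map: (keyword, kind, priority). The group priority equals the
-- # position of the keyword's group in the original elif chains, so the minimum
-- # matched priority reproduces the chains' first-match choice.
-- KEYWORDS = [
--     ('silk', 'm', 0), ('satin', 'm', 0), ('charmeuse', 'm', 0),
--     ('cotton', 'm', 1), ('organic', 'm', 1),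
--     ('linen', 'm', 2), ('flax', 'm', 2),
--     ('wool', 'm', 3), ('cashmere', 'm', 3), ('merino', 'm', 3),
--     ('leather', 'm', 4), ('suede', 'm', 4), ('nubuck', 'm', 4),
--     ('denim', 'm', 5), ('chambray', 'm', 5),
--     ('velvet', 'm', 6), ('velour', 'm', 6), ('plush', 'm', 6),
--     ('chiffon', 'm', 7), ('georgette', 'm', 7), ('sheer', 'm', 7),
--     ('knit', 'm', 8), ('sweater', 'm', 8), ('cable', 'm', 8),
--     ('polyester', 'm', 9), ('poly', 'm', 9),
--     ('stretch', 'm', 10), ('spandex', 'm', 10), ('lycra', 'm', 10),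
--     ('sequin', 'm', 11), ('glitter', 'm', 11), ('sparkle', 'm', 11),
--     ('lace', 'm', 12), ('crochet', 'm', 12), ('eyelet', 'm', 12),
--     ('mesh', 'm', 13), ('net', 'm', 13), ('tulle', 'm', 13),
--     ('fleece', 'm', 14), ('sherpa', 'm', 14), ('teddy', 'm', 14),
--     ('elegant', 's', 0), ('formal', 's', 0), ('evening', 's', 0),
--     ('sophisticated', 's', 0), ('luxury', 's', 0), ('cocktail', 's', 0),
--     ('casual', 's', 1), ('everyday', 's', 1), ('comfortable', 's', 1), ('relaxed', 's', 1),
--     ('vintage', 's', 2), ('retro', 's', 2), ('classic', 's', 2), ('antique', 's', 2), ('throwback', 's', 2),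
--     ('modern', 's', 3), ('contemporary', 's', 3), ('trendy', 's', 3), ('fashion-forward', 's', 3), ('chic', 's', 3),
--     ('boho', 's', 4), ('bohemian', 's', 4), ('hippie', 's', 4), ('festival', 's', 4), ('free spirit', 's', 4),
--     ('romantic', 's', 5), ('feminine', 's', 5), ('delicate', 's', 5), ('soft', 's', 5), ('dreamy', 's', 5),
--     ('edgy', 's', 6), ('bold', 's', 6), ('statement', 's', 6), ('punk', 's', 6), ('grunge', 's', 6),
--     ('preppy', 's', 7), ('classic', 's', 7), ('collegiate', 's', 7), ('ivy league', 's', 7),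
--     ('athletic', 's', 8), ('sporty', 's', 8), ('activewear', 's', 8), ('performance', 's', 8),
--     ('minimalist', 's', 9), ('minimal', 's', 9), ('simple', 's', 9), ('clean', 's', 9),
--     ('glamorous', 's', 10), ('glam', 's', 10), ('sparkle', 's', 10), ('luxe', 's', 10),
-- ]
--
-- MATERIAL_VALUES = [
--     ["Silk", "Luxurious"], ["Cotton", "Breathable"], ["Linen", "Natural"],
--     ["Wool", "Warm"], ["Leather", "Premium"], ["Denim", "Durable"],
--     ["Velvet", "Plush"], ["Chiffon", "Lightweight"], ["Knit", "Cozy"],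
--     ["Polyester", "Wrinkle-resistant"], ["Stretch", "Comfortable"],
--     ["Sequin", "Sparkling"], ["Lace", "Delicate"], ["Mesh", "Sheer"],
--     ["Fleece", "Warm"],
-- ]
--
-- STYLE_VALUES = [
--     "Elegant", "Casual", "Vintage", "Modern", "Boho", "Romantic",
--     "Edgy", "Preppy", "Athletic", "Minimalist", "Glamorous",
-- ]
--
--
-- def _detect_materials_style(labels: List[str], category: str) -> tuple:
--     """Single pass over a flat keyword map, keeping the minimum matched
--     group priority for material and style; then index into the value tables."""
--     hay = ' '.join(labels).lower()
--     best_m = None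
--     best_s = None
--     for kw, kind, pri in KEYWORDS:
--         if kw in hay:
--             if kind == 'm':
--                 if best_m is None or pri < best_m:
--                     best_m = pri
--             else:
--                 if best_s is None or pri < best_s:
--                     best_s = pri
--     if best_m is not None:
--         materials = MATERIAL_VALUES[best_m]
--     elif category == "Apparel & Fashion":
--         materials = ["Fabric", "Quality Material"]
--     else:
--         materials = ["Quality", "Fabric"]
--     style = STYLE_VALUES[best_s] if best_s is not None else "Classic"
--     return materials, style
-- ===== Notes on version B (the rewrite author's own statement) =====
-- stated objective: alternative
-- what changed: Replaces the two first-match if/elif chains with a single pass over one flat keyword->(kind, group-priority) table that keeps the minimum matched priority per kind, then indexes value tables; correct because the minimum matched group priority equals the index of the first matching group in the chains' order.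
import Mathlib
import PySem

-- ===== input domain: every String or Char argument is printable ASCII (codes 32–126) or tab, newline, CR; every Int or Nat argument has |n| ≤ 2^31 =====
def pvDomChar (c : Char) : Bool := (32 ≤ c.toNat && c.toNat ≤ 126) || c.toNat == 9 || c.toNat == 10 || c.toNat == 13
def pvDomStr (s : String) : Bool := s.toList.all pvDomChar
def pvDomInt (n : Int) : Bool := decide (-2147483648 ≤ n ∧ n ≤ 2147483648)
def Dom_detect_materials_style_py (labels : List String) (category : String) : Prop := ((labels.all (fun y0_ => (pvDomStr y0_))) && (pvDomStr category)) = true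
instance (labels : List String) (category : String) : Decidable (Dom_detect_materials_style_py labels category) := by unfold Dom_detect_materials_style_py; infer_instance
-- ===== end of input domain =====

-- B replaces the two first-match if/elif chains by ONE pass over a flat keyword map that keeps
-- the minimum matched group priority per kind, then indexes value tables (alternative algorithm).

-- ===== PORT A =====
-- literal transliteration of the if/elif chains; 'any(mat in all_labels for mat in [...])' = List.any with PySem.Str.isIn
def detect_materials_style_py (labels : List String) (category : String) : List String × String :=
  let all_labels := PySem.Str.lower (PySem.Str.join " " labels)
  let materials :=
    if ["silk", "satin", "charmeuse"].any (fun mat => PySem.Str.isIn mat all_labels) then ["Silk", "Luxurious"]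
    else if ["cotton", "organic"].any (fun mat => PySem.Str.isIn mat all_labels) then ["Cotton", "Breathable"]
    else if ["linen", "flax"].any (fun mat => PySem.Str.isIn mat all_labels) then ["Linen", "Natural"]
    else if ["wool", "cashmere", "merino"].any (fun mat => PySem.Str.isIn mat all_labels) then ["Wool", "Warm"]
    else if ["leather", "suede", "nubuck"].any (fun mat => PySem.Str.isIn mat all_labels) then ["Leather", "Premium"]
    else if ["denim", "chambray"].any (fun mat => PySem.Str.isIn mat all_labels) then ["Denim", "Durable"]
    else if ["velvet", "velour", "plush"].any (fun mat => PySem.Str.isIn mat all_labels) then ["Velvet", "Plush"]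
    else if ["chiffon", "georgette", "sheer"].any (fun mat => PySem.Str.isIn mat all_labels) then ["Chiffon", "Lightweight"]
    else if ["knit", "sweater", "cable"].any (fun mat => PySem.Str.isIn mat all_labels) then ["Knit", "Cozy"]
    else if ["polyester", "poly"].any (fun mat => PySem.Str.isIn mat all_labels) then ["Polyester", "Wrinkle-resistant"]
    else if ["stretch", "spandex", "lycra"].any (fun mat => PySem.Str.isIn mat all_labels) then ["Stretch", "Comfortable"]
    else if ["sequin", "glitter", "sparkle"].any (fun mat => PySem.Str.isIn mat all_labels) then ["Sequin", "Sparkling"]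
    else if ["lace", "crochet", "eyelet"].any (fun mat => PySem.Str.isIn mat all_labels) then ["Lace", "Delicate"]
    else if ["mesh", "net", "tulle"].any (fun mat => PySem.Str.isIn mat all_labels) then ["Mesh", "Sheer"]
    else if ["fleece", "sherpa", "teddy"].any (fun mat => PySem.Str.isIn mat all_labels) then ["Fleece", "Warm"]
    else if category == "Apparel & Fashion" then ["Fabric", "Quality Material"]
    else ["Quality", "Fabric"]
  let style :=
    if ["elegant", "formal", "evening", "sophisticated", "luxury", "cocktail"].any (fun s => PySem.Str.isIn s all_labels) then "Elegant"
    else if ["casual", "everyday", "comfortable", "relaxed"].any (fun s => PySem.Str.isIn s all_labels) then "Casual"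
    else if ["vintage", "retro", "classic", "antique", "throwback"].any (fun s => PySem.Str.isIn s all_labels) then "Vintage"
    else if ["modern", "contemporary", "trendy", "fashion-forward", "chic"].any (fun s => PySem.Str.isIn s all_labels) then "Modern"
    else if ["boho", "bohemian", "hippie", "festival", "free spirit"].any (fun s => PySem.Str.isIn s all_labels) then "Boho"
    else if ["romantic", "feminine", "delicate", "soft", "dreamy"].any (fun s => PySem.Str.isIn s all_labels) then "Romantic"
    else if ["edgy", "bold", "statement", "punk", "grunge"].any (fun s => PySem.Str.isIn s all_labels) then "Edgy"
    else if ["preppy", "classic", "collegiate", "ivy league"].any (fun s => PySem.Str.isIn s all_labels) then "Preppy"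
    else if ["athletic", "sporty", "activewear", "performance"].any (fun s => PySem.Str.isIn s all_labels) then "Athletic"
    else if ["minimalist", "minimal", "simple", "clean"].any (fun s => PySem.Str.isIn s all_labels) then "Minimalist"
    else if ["glamorous", "glam", "sparkle", "luxe"].any (fun s => PySem.Str.isIn s all_labels) then "Glamorous"
    else "Classic"
  (materials, style)

-- ===== PORT B =====
-- Source B's flat KEYWORDS table: (keyword, kind 'm'/'s', group priority)
def pvKeywords : List (String × String × Nat) :=
  [ ("silk", "m", 0), ("satin", "m", 0), ("charmeuse", "m", 0),
    ("cotton", "m", 1), ("organic", "m", 1),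
    ("linen", "m", 2), ("flax", "m", 2),
    ("wool", "m", 3), ("cashmere", "m", 3), ("merino", "m", 3),
    ("leather", "m", 4), ("suede", "m", 4), ("nubuck", "m", 4),
    ("denim", "m", 5), ("chambray", "m", 5),
    ("velvet", "m", 6), ("velour", "m", 6), ("plush", "m", 6),
    ("chiffon", "m", 7), ("georgette", "m", 7), ("sheer", "m", 7),
    ("knit", "m", 8), ("sweater", "m", 8), ("cable", "m", 8),
    ("polyester", "m", 9), ("poly", "m", 9),
    ("stretch", "m", 10), ("spandex", "m", 10), ("lycra", "m", 10),
    ("sequin", "m", 11), ("glitter", "m", 11), ("sparkle", "m", 11),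
    ("lace", "m", 12), ("crochet", "m", 12), ("eyelet", "m", 12),
    ("mesh", "m", 13), ("net", "m", 13), ("tulle", "m", 13),
    ("fleece", "m", 14), ("sherpa", "m", 14), ("teddy", "m", 14),
    ("elegant", "s", 0), ("formal", "s", 0), ("evening", "s", 0),
    ("sophisticated", "s", 0), ("luxury", "s", 0), ("cocktail", "s", 0),
    ("casual", "s", 1), ("everyday", "s", 1), ("comfortable", "s", 1), ("relaxed", "s", 1),
    ("vintage", "s", 2), ("retro", "s", 2), ("classic", "s", 2), ("antique", "s", 2), ("throwback", "s", 2),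
    ("modern", "s", 3), ("contemporary", "s", 3), ("trendy", "s", 3), ("fashion-forward", "s", 3), ("chic", "s", 3),
    ("boho", "s", 4), ("bohemian", "s", 4), ("hippie", "s", 4), ("festival", "s", 4), ("free spirit", "s", 4),
    ("romantic", "s", 5), ("feminine", "s", 5), ("delicate", "s", 5), ("soft", "s", 5), ("dreamy", "s", 5),
    ("edgy", "s", 6), ("bold", "s", 6), ("statement", "s", 6), ("punk", "s", 6), ("grunge", "s", 6),
    ("preppy", "s", 7), ("classic", "s", 7), ("collegiate", "s", 7), ("ivy league", "s", 7),
    ("athletic", "s", 8), ("sporty", "s", 8), ("activewear", "s", 8), ("performance", "s", 8),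
    ("minimalist", "s", 9), ("minimal", "s", 9), ("simple", "s", 9), ("clean", "s", 9),
    ("glamorous", "s", 10), ("glam", "s", 10), ("sparkle", "s", 10), ("luxe", "s", 10) ]

def pvMaterialValues : List (List String) :=
  [ ["Silk", "Luxurious"], ["Cotton", "Breathable"], ["Linen", "Natural"],
    ["Wool", "Warm"], ["Leather", "Premium"], ["Denim", "Durable"],
    ["Velvet", "Plush"], ["Chiffon", "Lightweight"], ["Knit", "Cozy"],
    ["Polyester", "Wrinkle-resistant"], ["Stretch", "Comfortable"],
    ["Sequin", "Sparkling"], ["Lace", "Delicate"], ["Mesh", "Sheer"],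
    ["Fleece", "Warm"] ]

def pvStyleValues : List String :=
  [ "Elegant", "Casual", "Vintage", "Modern", "Boho", "Romantic",
    "Edgy", "Preppy", "Athletic", "Minimalist", "Glamorous" ]

-- 'if best is None or pri < best: best = pri'
def pvBetter (a : Option Nat) (p : Nat) : Option Nat :=
  match a with
  | none => some p
  | some q => if p < q then some p else some q

-- one iteration of Source B's single loop over (kw, kind, pri)
def pvStep (hay : String) (acc : Option Nat × Option Nat) (e : String × String × Nat) : Option Nat × Option Nat :=
  if PySem.Str.isIn e.1 hay then
    if e.2.1 == "m" then (pvBetter acc.1 e.2.2, acc.2) else (acc.1, pvBetter acc.2 e.2.2)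
  else acc

-- Source B's final 'if best_m is not None … elif category … else …'
def pvMatOf (category : String) (o : Option Nat) : List String :=
  match o with
  | some p => pvMaterialValues.getD p []
  | none => if category == "Apparel & Fashion" then ["Fabric", "Quality Material"] else ["Quality", "Fabric"]

-- Source B's 'STYLE_VALUES[best_s] if best_s is not None else "Classic"'
def pvStyOf (o : Option Nat) : String :=
  match o with
  | some p => pvStyleValues.getD p "Classic"
  | none => "Classic"

def detect_materials_style_py_alt (labels : List String) (category : String) : List String × String :=
  let hay := PySem.Str.lower (PySem.Str.join " " labels)
  let best := pvKeywords.foldl (pvStep hay) (none, none)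
  (pvMatOf category best.1, pvStyOf best.2)

-- ===== PRECONDITION & SPEC =====
def Spec_detect_materials_style_py (labels : List String) (category : String) (out : List String × String) : Prop := out = detect_materials_style_py_alt labels category
instance (labels : List String) (category : String) (out : List String × String) : Decidable (Spec_detect_materials_style_py labels category out) := by unfold Spec_detect_materials_style_py; infer_instance

-- ===== CLAIM (what is proved, stated in full; the proofs are below) =====
def Claim_equal_detect_materials_style_py : Prop := ∀ (labels : List String) (category : String), Dom_detect_materials_style_py labels category → Spec_detect_materials_style_py labels category (detect_materials_style_py labels category)

-- ===== LEMMAS AND PROOFS =====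

-- the min-step over a single (keyword, priority) pair
def pvMinStep (hay : String) (a : Option Nat) (e : String × Nat) : Option Nat :=
  if PySem.Str.isIn e.1 hay then pvBetter a e.2 else a

-- groups flattened with priorities k, k+1, …
def pvFlatKw : Nat → List (List String) → List (String × Nat)
  | _, [] => []
  | k, g :: rest => g.map (fun w => (w, k)) ++ pvFlatKw (k + 1) rest

-- index of the first group with a substring hit (A's chain shape)
def pvFirstIdx (hay : String) : Nat → List (List String) → Option Nat
  | _, [] => none
  | k, g :: rest => if g.any (fun w => PySem.Str.isIn w hay) then some k else pvFirstIdx hay (k + 1) rest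

def pvMatGroups : List (List String) :=
  [ ["silk", "satin", "charmeuse"], ["cotton", "organic"], ["linen", "flax"],
    ["wool", "cashmere", "merino"], ["leather", "suede", "nubuck"], ["denim", "chambray"],
    ["velvet", "velour", "plush"], ["chiffon", "georgette", "sheer"], ["knit", "sweater", "cable"],
    ["polyester", "poly"], ["stretch", "spandex", "lycra"], ["sequin", "glitter", "sparkle"],
    ["lace", "crochet", "eyelet"], ["mesh", "net", "tulle"], ["fleece", "sherpa", "teddy"] ]

def pvStyGroups : List (List String) :=
  [ ["elegant", "formal", "evening", "sophisticated", "luxury", "cocktail"],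
    ["casual", "everyday", "comfortable", "relaxed"],
    ["vintage", "retro", "classic", "antique", "throwback"],
    ["modern", "contemporary", "trendy", "fashion-forward", "chic"],
    ["boho", "bohemian", "hippie", "festival", "free spirit"],
    ["romantic", "feminine", "delicate", "soft", "dreamy"],
    ["edgy", "bold", "statement", "punk", "grunge"],
    ["preppy", "classic", "collegiate", "ivy league"],
    ["athletic", "sporty", "activewear", "performance"],
    ["minimalist", "minimal", "simple", "clean"],
    ["glamorous", "glam", "sparkle", "luxe"] ]

-- the paired fold splits into two independent min-folds over the 'm' and 's' keywords
theorem pvStep_eq (hay : String) (acc : Option Nat × Option Nat) (e : String × String × Nat) :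
    pvStep hay acc e =
      if e.2.1 == "m" then (pvMinStep hay acc.1 (e.1, e.2.2), acc.2)
      else (acc.1, pvMinStep hay acc.2 (e.1, e.2.2)) := by
  simp only [pvStep, pvMinStep]
  split_ifs <;> rfl

theorem pvFold_split (hay : String) (kws : List (String × String × Nat)) (a b : Option Nat) :
    kws.foldl (pvStep hay) (a, b) =
      (((kws.filter (fun e => e.2.1 == "m")).map (fun e => (e.1, e.2.2))).foldl (pvMinStep hay) a,
       ((kws.filter (fun e => !(e.2.1 == "m"))).map (fun e => (e.1, e.2.2))).foldl (pvMinStep hay) b) := by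
  induction kws generalizing a b with
  | nil => rfl
  | cons e kws ih =>
    rw [List.foldl_cons, pvStep_eq, List.filter_cons, List.filter_cons]
    by_cases hk : (e.2.1 == "m") = true
    · simp only [hk, Bool.not_true, if_true, List.map_cons, List.foldl_cons]
      exact ih _ _
    · simp only [Bool.not_eq_true] at hk
      simp only [hk, Bool.not_false, if_true, List.map_cons, List.foldl_cons]
      exact ih _ _

-- a settled minimum q is never displaced by later priorities ≥ q
theorem pvFoldMin_some (hay : String) (q : Nat) (l : List (String × Nat))
    (h : ∀ e ∈ l, q ≤ e.2) : l.foldl (pvMinStep hay) (some q) = some q := by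
  induction l with
  | nil => rfl
  | cons e l ih =>
    have hq : q ≤ e.2 := h e (by simp)
    have hstep : pvMinStep hay (some q) e = some q := by
      by_cases hw : PySem.Str.isIn e.1 hay = true
      · simp only [pvMinStep, pvBetter, hw, if_true]
        rw [if_neg (Nat.not_lt.mpr hq)]
      · simp only [Bool.not_eq_true] at hw
        simp only [pvMinStep, hw]
        rfl
    rw [List.foldl_cons, hstep]
    exact ih (fun x hx => h x (by simp [hx]))

-- a single group, all at priority k
theorem pvFoldMin_group (hay : String) (k : Nat) (g : List String) :
    (g.map (fun w => (w, k))).foldl (pvMinStep hay) none =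
      if g.any (fun w => PySem.Str.isIn w hay) then some k else none := by
  induction g with
  | nil => rfl
  | cons w g ih =>
    by_cases hw : PySem.Str.isIn w hay = true
    · simp only [List.map_cons, List.foldl_cons, List.any_cons, hw, Bool.true_or, if_true]
      have hstep : pvMinStep hay none (w, k) = some k := by
        simp only [pvMinStep, pvBetter, hw, if_true]
      rw [hstep]
      refine pvFoldMin_some hay k _ ?_
      intro e he
      obtain ⟨w', _, rfl⟩ := List.mem_map.1 he
      exact le_refl k
    · have hw' : PySem.Str.isIn w hay = false := by simpa using hw
      simp only [List.map_cons, List.foldl_cons, List.any_cons, hw', Bool.false_or]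
      have hstep : pvMinStep hay none (w, k) = none := by
        simp only [pvMinStep, hw']
        rfl
      rw [hstep, ih]

theorem pvFlatKw_ge (rules : List (List String)) (k : Nat) :
    ∀ e ∈ pvFlatKw k rules, k ≤ e.2 := by
  induction rules generalizing k with
  | nil => intro e he; simp [pvFlatKw] at he
  | cons g rest ih =>
    intro e he
    simp only [pvFlatKw, List.mem_append, List.mem_map] at he
    rcases he with ⟨w, _, rfl⟩ | he
    · exact le_refl k
    · exact Nat.le_of_succ_le (ih (k + 1) e he)

-- the min-fold over the flattened groups IS the first-matching-group index
theorem pvFoldMin_flatKw (hay : String) (rules : List (List String)) (k : Nat) :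
    (pvFlatKw k rules).foldl (pvMinStep hay) none = pvFirstIdx hay k rules := by
  induction rules generalizing k with
  | nil => rfl
  | cons g rest ih =>
    simp only [pvFlatKw, pvFirstIdx, List.foldl_append, pvFoldMin_group]
    by_cases hg : (g.any fun w => PySem.Str.isIn w hay) = true
    · rw [if_pos hg, if_pos hg]
      exact pvFoldMin_some hay k _ (fun e he => Nat.le_of_succ_le (pvFlatKw_ge rest (k + 1) e he))
    · rw [if_neg hg, if_neg hg]
      exact ih (k + 1)

-- the flat table's 'm' / 's' projections are exactly the flattened chains (concrete computation)
theorem pvKeywords_m :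
    ((pvKeywords.filter (fun e => e.2.1 == "m")).map (fun e => (e.1, e.2.2))) = pvFlatKw 0 pvMatGroups := by
  rfl

theorem pvKeywords_s :
    ((pvKeywords.filter (fun e => !(e.2.1 == "m"))).map (fun e => (e.1, e.2.2))) = pvFlatKw 0 pvStyGroups := by
  rfl

-- ===== VERDICT (by name: the statement is the Claim_ definition above) =====
-- pushing the result selectors through one if of the chain
theorem pvMatOf_ite (category : String) (c : Prop) [Decidable c] (x : Nat) (r : Option Nat) :
    pvMatOf category (if c then some x else r) =
      if c then pvMaterialValues.getD x [] else pvMatOf category r := by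
  rw [apply_ite (pvMatOf category)]
  rfl

theorem pvStyOf_ite (c : Prop) [Decidable c] (x : Nat) (r : Option Nat) :
    pvStyOf (if c then some x else r) =
      if c then pvStyleValues.getD x "Classic" else pvStyOf r := by
  rw [apply_ite pvStyOf]
  rfl

set_option maxHeartbeats 2000000 in
theorem detect_materials_style_py_spec : Claim_equal_detect_materials_style_py := by
  intro labels category _
  unfold Spec_detect_materials_style_py detect_materials_style_py detect_materials_style_py_alt
  dsimp only
  rw [pvFold_split, pvKeywords_m, pvKeywords_s, pvFoldMin_flatKw, pvFoldMin_flatKw]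
  simp only [pvMatGroups, pvStyGroups, pvFirstIdx, pvMatOf_ite, pvStyOf_ite]
  rfl
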